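-- pv_equiv track=rewrite | github.com/hexan86/Lucipher | Lucipher.py | encode
-- ===== SOURCE A (Python) =====
-- def get_sirn(text):
--     # Calculate the Static Initial Rotation Number
--     return len(text)
--
-- def encode(text):
--     # Encode: use the SIRN as a starting point to calculate the shifting
--     sirn = get_sirn(text)
--     irn = sirn
--     encoded_text = []
--     word_count = 0
--
--
--     # Find spaces to separate words and alter the shifting
--     for i, char in enumerate(text):
--         if char == ' ':
--             word_count += 1
--             irn = sirn + word_count  # Increment IRN for the next word
--             encoded_text.append(char)
--         elif char.isalpha():
--             shift = irn + (i - sum(1 for c in text[:i] if c == ' '))  # Calculate shift based on position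
--             encoded_char = chr((ord(char) - ord('A') + shift) % 26 + ord('A')) if char.isupper() else \
--                            chr((ord(char) - ord('a') + shift) % 26 + ord('a'))
--             encoded_text.append(encoded_char)
--         else:
--             encoded_text.append(char)  # Non-alphabetic characters remain unchanged
--
--     return ''.join(encoded_text)
-- ===== SOURCE B (Python) =====
-- def encode(text):
--     # Stateless one-pass: A's irn/word_count bookkeeping cancels algebraically,
--     # leaving a shift of len(text) + i for the letter at index i.
--     n = len(text)
--     out = []
--     for i, c in enumerate(text):
--         if c.isalpha():
--             base = ord('A') if c.isupper() else ord('a')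
--             out.append(chr((ord(c) - base + n + i) % 26 + base))
--         else:
--             out.append(c)
--     return ''.join(out)
-- ===== Notes on version B (the rewrite author's own statement) =====
-- stated objective: faster
-- what changed: Replaced the per-letter re-scan of the prefix for spaces and the irn/word_count state with the closed-form shift len(text)+i (the word-count added to irn cancels the spaces subtracted from the position), giving a stateless single pass.
import Mathlib
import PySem

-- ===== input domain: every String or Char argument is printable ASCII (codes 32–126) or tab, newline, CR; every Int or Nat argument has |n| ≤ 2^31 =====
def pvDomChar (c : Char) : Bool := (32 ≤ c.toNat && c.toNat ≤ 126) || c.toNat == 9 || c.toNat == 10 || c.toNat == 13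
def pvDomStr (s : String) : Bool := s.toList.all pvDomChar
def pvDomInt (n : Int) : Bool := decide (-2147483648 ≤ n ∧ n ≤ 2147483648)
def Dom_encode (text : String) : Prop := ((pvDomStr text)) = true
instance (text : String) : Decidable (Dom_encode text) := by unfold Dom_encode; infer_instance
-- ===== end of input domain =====

-- B replaces A's per-letter prefix re-scan and irn/word_count state with the closed-form shift len(text)+i (faster, asymptotic).


-- ===== PORT A =====
-- step of A's for-loop: state (irn, word_count, encoded_text)
def encAstep (cs : List Char) (sirn : Int) (st : Int × Int × List Char) (p : Int × Char) :
    Int × Int × List Char :=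
  let irn := st.1; let wc := st.2.1; let acc := st.2.2
  let i := p.1; let c := p.2
  if c = ' ' then
    (sirn + (wc + 1), wc + 1, acc ++ [c])
  else if PySem.Chars.isalpha c then
    -- sum(1 for c in text[:i] if c == ' ')
    let spaces : Int :=
      (PySem.List.slice cs none (some i)).foldl (fun a x => if x = ' ' then a + 1 else a) 0
    let shift := irn + (i - spaces)
    let ec :=
      if PySem.Chars.isupper c then
        Char.ofNat ((PySem.Int.mod (((c.toNat : Int) - 65) + shift) 26 + 65).toNat)
      else
        Char.ofNat ((PySem.Int.mod (((c.toNat : Int) - 97) + shift) 26 + 97).toNat)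
    (irn, wc, acc ++ [ec])
  else
    (irn, wc, acc ++ [c])

def encode (text : String) : String :=
  let cs := text.toList
  let sirn : Int := cs.length
  String.ofList ((PySem.List.enumerate cs 0).foldl (encAstep cs sirn) (sirn, 0, [])).2.2

-- ===== PORT B =====
-- B: stateless map — the letter at index i is shifted by len(text) + i
def encBchar (n : Int) (p : Int × Char) : Char :=
  let i := p.1; let c := p.2
  if PySem.Chars.isalpha c then
    if PySem.Chars.isupper c then
      Char.ofNat ((PySem.Int.mod (((c.toNat : Int) - 65) + (n + i)) 26 + 65).toNat)
    else
      Char.ofNat ((PySem.Int.mod (((c.toNat : Int) - 97) + (n + i)) 26 + 97).toNat)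
  else c

def encode_alt (text : String) : String :=
  let cs := text.toList
  String.ofList ((PySem.List.enumerate cs 0).map (encBchar (cs.length : Int)))

-- ===== PRECONDITION & SPEC =====
def Spec_encode (text : String) (out : String) : Prop := out = encode_alt text
instance (text : String) (out : String) : Decidable (Spec_encode text out) := by unfold Spec_encode; infer_instance

-- ===== CLAIM (what is proved, stated in full; the proofs are below) =====
def Claim_equal_encode : Prop := ∀ (text : String), Dom_encode text → Spec_encode text (encode text)

-- ===== LEMMAS AND PROOFS =====

-- Loop invariant: after processing prefix `pre`, word_count = number of spaces in `pre`
-- and irn = sirn + word_count; then each remaining char is encoded exactly as B encodes it.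
lemma encA_loop (cs : List Char) :
    ∀ (l pre acc : List Char), cs = pre ++ l →
    ((PySem.List.enumerate l (pre.length : Int)).foldl (encAstep cs (cs.length : Int))
        ((cs.length : Int) + (pre.countP (· = ' ') : Int), (pre.countP (· = ' ') : Int), acc)).2.2
      = acc ++ (PySem.List.enumerate l (pre.length : Int)).map (encBchar (cs.length : Int)) := by
  intro l
  induction l with
  | nil => intro pre acc _; simp [PySem.List.enumerate_nil]
  | cons c rest ih =>
    intro pre acc hcs
    rw [PySem.List.enumerate_cons]
    simp only [List.foldl_cons, List.map_cons]
    have hpre1 : ((pre ++ [c]).length : Int) = (pre.length : Int) + 1 := by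
      simp
    have hcs' : cs = (pre ++ [c]) ++ rest := by simpa using hcs
    by_cases hsp : c = ' '
    · -- space branch
      have hcount : ((pre ++ [c]).countP (· = ' ') : Int) = (pre.countP (· = ' ') : Int) + 1 := by
        subst hsp; simp [List.countP_append]
      have := ih (pre ++ [c]) (acc ++ [c]) hcs'
      rw [hpre1, hcount] at this
      simp only [encAstep, hsp]
      simpa [hsp] using this
    · by_cases hal : PySem.Chars.isalpha c = true
      · -- alpha branch: shift = irn + (i - spaces(pre)) = cs.length + pre.length
        have hslice : PySem.List.slice cs none (some (pre.length : Int)) = pre := by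
          rw [hcs, PySem.List.slice_to_natCast]; simp
        have hcount : ((pre ++ [c]).countP (· = ' ') : Int) = (pre.countP (· = ' ') : Int) := by
          simp [List.countP_append, hsp]
        have hfold : pre.foldl (fun a x => if x = ' ' then a + 1 else a) (0 : Int)
            = (pre.countP (· = ' ') : Int) := by
          simpa using PySem.List.foldl_if_add_one (p := fun x => x = ' ') (l := pre) (a := (0 : Int))
        have harith : (cs.length : Int) + (pre.countP (· = ' ') : Int)
              + ((pre.length : Int) - (pre.countP (· = ' ') : Int))
            = (cs.length : Int) + (pre.length : Int) := by ring
        have hthis := ih (pre ++ [c]) (acc ++ [encBchar (cs.length : Int) ((pre.length : Int), c)]) hcs'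
        rw [hpre1, hcount] at hthis
        simp only [encAstep, if_neg hsp, hal, ite_true, hslice, hfold]
        rw [harith]
        simp only [encBchar, hal, ite_true] at hthis ⊢
        simpa using hthis
      · -- other characters unchanged
        have hcount : ((pre ++ [c]).countP (· = ' ') : Int) = (pre.countP (· = ' ') : Int) := by
          simp [List.countP_append, hsp]
        have := ih (pre ++ [c]) (acc ++ [c]) hcs'
        rw [hpre1, hcount] at this
        simp only [encAstep, if_neg hsp, hal, encBchar]
        simpa [hal] using this

-- ===== VERDICT (by name: the statement is the Claim_ definition above) =====
theorem encode_spec : Claim_equal_encode := by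
  intro text _
  unfold Spec_encode encode encode_alt
  have h := encA_loop text.toList text.toList [] [] (by simp)
  simp only [List.countP_nil, Nat.cast_zero, add_zero, List.nil_append] at h
  exact congrArg String.ofList h
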